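-- pv_equiv track=rewrite | github.com/YanZhu1105/AlgorithmQIUZHAO | Week_02/[47]Permutations II.py | permuteUniqueStandard
-- ===== SOURCE A (Python) =====
-- def permuteUniqueStandard(nums):
--     """
--     :type nums: List[int]
--     :rtype: List[List[int]]
--     """
--
--     def helper(path):
--         if len(path) == n:
--             res.append(path[:])
--             return
--
--         for i in range(len(nums)):
--             if not used[i]:
--                 if i > 0 and nums[i] == nums[i - 1] and not used[i - 1]:
--                     continue
--                 path.append(nums[i])
--                 used[i] = True
--                 helper(path)
--                 path.pop()
--                 used[i] = False
--
--     if not nums: return []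
--     res, n = [], len(nums)
--     nums.sort()
--     used = [False for _ in range(len(nums))]
--     helper([])
--     return res
-- ===== SOURCE B (Python) =====
-- def permuteUniqueStandard(nums):
--     if not nums:
--         return []
--     nums.sort()
--
--     def perms(rem):
--         if not rem:
--             return [[]]
--         out = []
--         for x in dict.fromkeys(rem):
--             rest = rem.copy()
--             rest.remove(x)
--             out += [[x] + t for t in perms(rest)]
--         return out
--
--     return perms(nums)
-- ===== Notes on version B (the rewrite author's own statement) =====
-- stated objective: alternative
-- what changed: Replaced the boolean used-flags array, index loop with adjacent-duplicate skip, and mutable path/res accumulators by a pure recursion over the distinct remaining values (dict.fromkeys) that removes one occurrence per branch and builds the permutations functionally.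
import Mathlib
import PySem

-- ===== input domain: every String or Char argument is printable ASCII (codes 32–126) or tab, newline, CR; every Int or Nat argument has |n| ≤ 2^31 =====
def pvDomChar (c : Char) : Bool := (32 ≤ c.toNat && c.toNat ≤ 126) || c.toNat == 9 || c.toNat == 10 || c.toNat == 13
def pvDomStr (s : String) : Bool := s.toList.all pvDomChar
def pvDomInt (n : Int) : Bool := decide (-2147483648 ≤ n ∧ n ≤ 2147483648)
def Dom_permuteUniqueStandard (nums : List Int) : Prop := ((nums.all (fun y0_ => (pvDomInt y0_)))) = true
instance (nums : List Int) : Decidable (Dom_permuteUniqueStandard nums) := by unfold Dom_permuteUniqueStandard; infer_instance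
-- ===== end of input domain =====

-- B replaces A's used-flags-array index backtracking by a recursion over the distinct remaining
-- values; equivalence is about the RETURN value (both A and B sort `nums` in place in Python).

-- ===== PORT A =====
-- helper(path): the nested backtracking function; `fuel` only makes the recursion structural
-- (each nested Python call has one more element of `used` set, so depth ≤ n+1; fuel never runs
-- out on the initial call below — proved in the lemmas).  path/used mutation and restoration
-- (append/set, then pop/unset after the call) is rendered functionally: the callee receives the
-- extended path / updated used, the caller keeps its own.
def helperA (s : List Int) : Nat → List Bool → List Int → List (List Int) → List (List Int)
  | 0, _, _, res => res
  | f+1, used, path, res =>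
    if path.length = s.length then res ++ [path]
    else
      (PySem.List.pyRange 0 (s.length : Int) 1).foldl (fun r i =>
        if PySem.List.pyGetD used i false = false then
          if i > 0 ∧ PySem.List.pyGetD s i 0 = PySem.List.pyGetD s (i - 1) 0
              ∧ PySem.List.pyGetD used (i - 1) false = false then r
          else helperA s f (used.set i.toNat true) (path ++ [PySem.List.pyGetD s i 0]) r
        else r) res

def permuteUniqueStandard (nums : List Int) : List (List Int) :=
  if nums = [] then []
  else
    let s := PySem.List.sorted nums (fun x => x) false
    let used := (PySem.List.pyRange 0 (s.length : Int) 1).map (fun _ => false)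
    helperA s (s.length + 1) used [] []

-- ===== PORT B =====
-- perms(rem): recursion over the distinct values of rem (dict.fromkeys = PySem.List.dedup),
-- removing one occurrence per branch; `fuel` (= rem.length at the top call) only makes the
-- recursion structural — each recursive Python call gets a one-shorter list.
def permsB (fuel : Nat) (rem : List Int) : List (List Int) :=
  match fuel, rem with
  | _, [] => [[]]
  | 0, _ :: _ => []
  | f+1, x :: t =>
    (PySem.List.dedup (x :: t)).foldl
      (fun out v =>
        out ++ (permsB f ((PySem.List.remove? (x :: t) v).getD (x :: t))).map (fun w => v :: w)) []

def permuteUniqueStandard_alt (nums : List Int) : List (List Int) :=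
  if nums = [] then []
  else
    let s := PySem.List.sorted nums (fun x => x) false
    permsB s.length s

-- ===== PRECONDITION & SPEC =====
def Spec_permuteUniqueStandard (nums : List Int) (out : List (List Int)) : Prop := out = permuteUniqueStandard_alt nums
instance (nums : List Int) (out : List (List Int)) : Decidable (Spec_permuteUniqueStandard nums out) := by unfold Spec_permuteUniqueStandard; infer_instance

-- ===== CLAIM (what is proved, stated in full; the proofs are below) =====
def Claim_equal_permuteUniqueStandard : Prop := ∀ (nums : List Int), Dom_permuteUniqueStandard nums → Spec_permuteUniqueStandard nums (permuteUniqueStandard nums)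

-- ===== LEMMAS AND PROOFS =====

-- remaining (unused) values, in order
def remUU : List Int → List Bool → List Int
  | [], _ => []
  | _ :: _, [] => []
  | x :: s, b :: u => if b then remUU s u else x :: remUU s u

-- first-occurrence dedup
def ddp : List Int → List Int
  | [] => []
  | x :: l => x :: ddp (l.filter (fun y => y ≠ x))
termination_by l => l.length
decreasing_by exact Nat.lt_succ_of_le (le_trans (le_of_eq List.length_unattach) (le_trans (List.length_filter_le _ _) (le_of_eq List.length_attach)))

-- sortedness as an adjacent chain, with the previous element as context
def SP : Option Int → List Int → Prop
  | _, [] => True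
  | none, x :: s => SP (some x) s
  | some y, x :: s => y ≤ x ∧ SP (some x) s

-- run-prefix invariant: among equal adjacent values, used flags form a prefix
def RP : Option (Int × Bool) → List Int → List Bool → Prop
  | _, [], _ => True
  | _, _ :: _, [] => True
  | prev, x :: s, b :: u =>
    (match prev with
     | some (y, c) => x = y → b = true → c = true
     | none => True) ∧ RP (some (x, b)) s u

-- the indices A's loop branches on (Nat form of the port's test), with previous-element context
def pickP (prev : Option (Int × Bool)) (s : List Int) (u : List Bool) : Nat → Bool
  | 0 => (!u.getD 0 false) && !(match prev with
      | some (y, c) => decide (s.getD 0 0 = y) && !c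
      | none => false)
  | i+1 => (!u.getD (i+1) false) && !(decide (s.getD (i+1) 0 = s.getD i 0) && !u.getD i false)

-- values contributed, with the value skipped when the previous element is unused with that value
def sk : Option (Int × Bool) → List Int → List Int
  | some (y, false), l => (ddp l).filter (fun x => x ≠ y)
  | _, l => ddp l

lemma ddp_attach_clean (a : Int) (t : List Int) :
    (List.filter (fun x : {x // x ∈ t} => decide ¬(x.1 = a)) t.attach).unattach
      = t.filter (fun y => decide ¬(y = a)) := by
  rw [List.unattach_filter (g := fun y => decide ¬(y = a)) (hf := fun x h => rfl), List.unattach_attach]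

lemma mem_ddp : ∀ (l : List Int) (x : Int), x ∈ ddp l ↔ x ∈ l := by
  intro l
  induction l using ddp.induct with
  | case1 => intro x; simp [ddp]
  | case2 a t ih =>
    intro x
    rw [ddp_attach_clean] at ih
    simp only [ddp, List.mem_cons, ih, List.mem_filter]
    by_cases hx : x = a <;> simp [hx]

lemma filter_eq_self_of_ddp (a : Int) (l : List Int) (h : a ∉ l) :
    (ddp l).filter (fun y => y ≠ a) = ddp l := by
  apply List.filter_eq_self.2
  intro y hy
  have : y ∈ l := (mem_ddp l y).1 hy
  simp only [ne_eq, decide_eq_true_eq]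
  rintro rfl; exact h this

lemma ddp_filter (x : Int) : ∀ (l : List Int), (ddp l).filter (fun y => y ≠ x) = ddp (l.filter (fun y => y ≠ x)) := by
  intro l
  induction l using ddp.induct with
  | case1 => simp [ddp]
  | case2 a t ih =>
    rw [ddp_attach_clean] at ih
    by_cases hax : a = x
    · subst hax
      simp only [ddp, List.filter_cons]
      have e1 : (decide (a ≠ a)) = false := by simp
      simp only [ne_eq]
      have hnm : a ∉ t.filter (fun y => decide ¬(y = a)) := by
        intro hm
        have := (List.mem_filter.1 hm).2
        simp at this
      have := filter_eq_self_of_ddp a (t.filter (fun y => decide ¬(y = a))) hnm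
      simpa [ne_eq] using this
    · simp only [ddp, List.filter_cons]
      have e1 : (decide (a ≠ x)) = true := by simp [hax]
      simp only [e1, if_true, ne_eq]
      rw [ih, List.filter_filter]
      conv_rhs => rw [ddp]
      rw [List.filter_filter]
      congr 2
      apply List.filter_congr
      intro y _
      by_cases h1 : y = x <;> by_cases h2 : y = a <;> simp [h1, h2]

lemma foldl_add_eq_ddp : ∀ (l acc : List Int),
    l.foldl PySem.Set.add acc = acc ++ ddp (l.filter (fun z => z ∉ acc)) := by
  intro l
  induction l with
  | nil => intro acc; simp [ddp]
  | cons y l ih =>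
    intro acc
    by_cases hy : y ∈ acc
    · have hadd : PySem.Set.add acc y = acc := by
        simp [PySem.Set.add, PySem.Set.contains, hy]
      simp only [List.foldl_cons, hadd, ih, List.filter_cons]
      simp [hy]
    · have hadd : PySem.Set.add acc y = acc ++ [y] := by
        simp [PySem.Set.add, PySem.Set.contains, hy]
      simp only [List.foldl_cons, hadd, ih, List.filter_cons]
      have h1 : (decide (y ∉ acc)) = true := by simp [hy]
      simp only [h1, if_true, List.append_assoc, List.singleton_append]
      congr 2
      simp only [ddp]
      congr 1
      rw [List.filter_filter]
      congr 1
      apply List.filter_congr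
      intro z _
      by_cases h2 : z = y <;> by_cases h3 : z ∈ acc <;> simp [h2, h3]

lemma dedup_eq_ddp : ∀ (l : List Int), PySem.List.dedup l = ddp l := by
  intro l
  have h1 : PySem.List.dedup l = l.foldl PySem.Set.add [] := by
    rw [PySem.List.dedup_eq_ofList, PySem.Set.ofList_eq_foldl]
  rw [h1, foldl_add_eq_ddp]
  simp

lemma remUU_subset : ∀ (s : List Int) (u : List Bool) (x : Int), x ∈ remUU s u → x ∈ s := by
  intro s
  induction s with
  | nil => intro u x h; simp [remUU] at h
  | cons a t ih =>
    intro u x h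
    cases u with
    | nil => simp [remUU] at h
    | cons b u =>
      by_cases hb : b
      · subst hb; simp only [remUU, if_true] at h
        exact List.mem_cons_of_mem _ (ih u x h)
      · simp only [Bool.not_eq_true] at hb; subst hb
        simp only [remUU, Bool.false_eq_true, if_false, List.mem_cons] at h
        rcases h with h | h
        · exact h ▸ List.mem_cons_self
        · exact List.mem_cons_of_mem _ (ih u x h)

lemma SP_all : ∀ (s : List Int) (y z : Int), SP (some y) s → z ∈ s → y ≤ z := by
  intro s
  induction s with
  | nil => intro y z _ h; simp at h
  | cons a t ih =>
    intro y z hsp hz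
    obtain ⟨hya, hsp'⟩ := hsp
    rcases List.mem_cons.1 hz with rfl | hz
    · exact hya
    · exact le_trans hya (ih a z hsp' hz)

lemma SP_of_pairwise_aux : ∀ (s : List Int) (x : Int), List.Pairwise (· ≤ ·) (x :: s) → SP (some x) s := by
  intro s
  induction s with
  | nil => intro x _; trivial
  | cons a t ih =>
    intro x hp
    rcases List.pairwise_cons.1 hp with ⟨hx, hp'⟩
    exact ⟨hx a List.mem_cons_self, ih a hp'⟩

lemma SP_of_pairwise : ∀ (s : List Int), List.Pairwise (· ≤ ·) s → SP none s := by
  intro s hp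
  cases s with
  | nil => trivial
  | cons a t => exact SP_of_pairwise_aux t a hp

lemma RP_of_all_false : ∀ (s : List Int) (u : List Bool) (prev : Option (Int × Bool)),
    (∀ b ∈ u, b = false) → RP prev s u := by
  intro s
  induction s with
  | nil => intro u prev _; trivial
  | cons a t ih =>
    intro u prev hu
    cases u with
    | nil => trivial
    | cons b u =>
      have hb : b = false := hu b List.mem_cons_self
      subst hb
      refine ⟨?_, ih u _ (fun c hc => hu c (List.mem_cons_of_mem _ hc))⟩
      cases prev with
      | none => trivial
      | some yc => rcases yc with ⟨y, c⟩; intro _ hb'; exact absurd hb' (by simp)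

lemma remUU_all_false : ∀ (s : List Int), remUU s (List.replicate s.length false) = s := by
  intro s
  induction s with
  | nil => rfl
  | cons a t ih => simp [remUU, List.replicate_succ, ih]

lemma pickP_succ (prev : Option (Int × Bool)) (x : Int) (b : Bool) (s : List Int) (u : List Bool) (i : Nat) :
    pickP prev (x :: s) (b :: u) (i+1) = pickP (some (x, b)) s u i := by
  cases i <;> simp [pickP]

lemma RP_prev_mono (y : Int) (c : Bool) : ∀ (s : List Int) (u : List Bool),
    RP (some (y, c)) s u → RP (some (y, true)) s u := by
  intro s u h
  cases s with
  | nil => trivial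
  | cons a t =>
    cases u with
    | nil => trivial
    | cons b v => exact ⟨fun _ _ => rfl, h.2⟩

lemma RP_set : ∀ (s : List Int) (u : List Bool) (prev : Option (Int × Bool)) (i : Nat),
    RP prev s u → pickP prev s u i = true → RP prev s (u.set i true) := by
  intro s
  induction s with
  | nil => intro u prev i _ _; trivial
  | cons a t ih =>
    intro u prev i hrp hpk
    cases u with
    | nil => trivial
    | cons b v =>
      cases i with
      | zero =>
        simp only [pickP, Bool.and_eq_true, Bool.not_eq_true'] at hpk
        obtain ⟨hb, hskip⟩ := hpk
        subst hb
        simp only [List.set_cons_zero]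
        refine ⟨?_, RP_prev_mono a false t v hrp.2⟩
        cases prev with
        | none => trivial
        | some yc =>
          rcases yc with ⟨y, c⟩
          intro hay _
          by_contra hc
          simp only [Bool.not_eq_true] at hc; subst hc
          simp [hay] at hskip
      | succ j =>
        simp only [List.set_cons_succ]
        refine ⟨hrp.1, ?_⟩
        exact ih v (some (a, b)) j hrp.2 (by rwa [pickP_succ] at hpk)

lemma remUU_set_len : ∀ (s : List Int) (u : List Bool) (i : Nat),
    u.length = s.length → i < u.length → u.getD i false = false →
    (remUU s (u.set i true)).length + 1 = (remUU s u).length := by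
  intro s
  induction s with
  | nil =>
    intro u i hlen hi _
    have hu : u = [] := List.eq_nil_of_length_eq_zero (by simpa using hlen)
    subst hu; simp at hi
  | cons a t ih =>
    intro u i hlen hi hg
    cases u with
    | nil => simp at hi
    | cons b v =>
      cases i with
      | zero =>
        simp only [List.getD_cons_zero] at hg
        subst hg
        simp [remUU]
      | succ j =>
        simp only [List.set_cons_succ, remUU]
        have h := ih v j (by simpa using hlen) (by simpa using hi) (by simpa using hg)
        by_cases hb : b
        · subst hb; simpa using h
        · simp only [Bool.not_eq_true] at hb; subst hb
          simp only [Bool.false_eq_true, if_false, List.length_cons]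
          omega

lemma remUU_nil (u : List Bool) : remUU [] u = [] := by cases u <;> rfl

lemma sk_nil (prev : Option (Int × Bool)) : sk prev [] = [] := by
  rcases prev with _ | ⟨y, c⟩
  · simp [sk, ddp]
  · cases c <;> simp [sk, ddp]

lemma sk_eq_ddp (prev : Option (Int × Bool)) (l : List Int)
    (h : ∀ (y : Int), prev = some (y, false) → y ∉ l) : sk prev l = ddp l := by
  rcases prev with _ | ⟨y, c⟩
  · rfl
  · cases c with
    | true => rfl
    | false => exact filter_eq_self_of_ddp y l (h y rfl)

-- the CORE correspondence: A's picked indices, with their values and post-pick remainders,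
-- are exactly the distinct remaining values with one occurrence erased
lemma core : ∀ (s : List Int) (u : List Bool) (prev : Option (Int × Bool)),
    u.length = s.length → SP (prev.map (·.1)) s → RP prev s u →
    ((List.range s.length).filter (pickP prev s u)).map
        (fun i => (s.getD i 0, remUU s (u.set i true)))
      = (sk prev (remUU s u)).map (fun x => (x, (remUU s u).erase x)) := by
  intro s
  induction s with
  | nil =>
    intro u prev _ _ _
    simp [remUU_nil, sk_nil]
  | cons x s' ih =>
    intro u prev hlen hsp hrp
    cases u with
    | nil => simp at hlen
    | cons b u' =>
      have hlen' : u'.length = s'.length := by simpa using hlen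
      have hsp' : SP (some x) s' := by
        cases prev with
        | none => exact hsp
        | some p => exact hsp.2
      have hrp2 : RP (some (x, b)) s' u' := hrp.2
      have hxall : ∀ v ∈ remUU s' u', x ≤ v :=
        fun v hv => SP_all s' x v hsp' (remUU_subset s' u' v hv)
      rw [List.length_cons, List.range_succ_eq_map, List.filter_cons, List.filter_map]
      have hfc : List.filter (pickP prev (x :: s') (b :: u') ∘ Nat.succ) (List.range s'.length)
          = List.filter (pickP (some (x, b)) s' u') (List.range s'.length) := by
        apply List.filter_congr
        intro i _
        simp only [Function.comp_apply]
        exact pickP_succ prev x b s' u' i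
      rw [hfc]
      by_cases hb : b
      · -- head used: index 0 not picked, remainder unchanged
        subst hb
        have hp0 : pickP prev (x :: s') (true :: u') 0 = false := by
          cases prev with
          | none => simp [pickP]
          | some p => rcases p with ⟨y, c⟩; simp [pickP]
        rw [hp0]
        simp only [Bool.false_eq_true, if_false]
        rw [List.map_map]
        have hmc : ∀ i ∈ (List.range s'.length).filter (pickP (some (x, true)) s' u'),
            ((fun i => ((x :: s').getD i 0, remUU (x :: s') ((true :: u').set i true))) ∘ Nat.succ) i
              = (fun i => (s'.getD i 0, remUU s' (u'.set i true))) i := by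
          intro i _
          simp [remUU]
        rw [List.map_congr_left hmc, ih u' (some (x, true)) hlen' hsp' hrp2]
        have hre : remUU (x :: s') (true :: u') = remUU s' u' := by simp [remUU]
        rw [hre]
        congr 1
        rw [sk_eq_ddp (some (x, true)) _ (by intro y hy; simp at hy)]
        apply (sk_eq_ddp prev _ _).symm
        intro y hy hym
        subst hy
        have hxy : x ≠ y := by
          intro hxe
          have := hrp.1 hxe rfl
          simp at this
        have hyx : y ≤ x := by
          have hsp2 : SP (some y) (x :: s') := hsp
          exact hsp2.1
        exact hxy (le_antisymm (hxall y hym) hyx)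
      · -- head unused: remainder is x :: remUU s' u'
        simp only [Bool.not_eq_true] at hb
        subst hb
        have hrem : remUU (x :: s') (false :: u') = x :: remUU s' u' := by simp [remUU]
        have hxnm : x ∉ (remUU s' u').filter (fun y => y ≠ x) := by
          intro hm; have := (List.mem_filter.1 hm).2; simp at this
        have htl : List.map ((fun i => ((x :: s').getD i 0, remUU (x :: s') ((false :: u').set i true))) ∘ Nat.succ)
              (List.filter (pickP (some (x, false)) s' u') (List.range s'.length))
            = (ddp ((remUU s' u').filter (fun y => y ≠ x))).map
                (fun v => (v, (x :: remUU s' u').erase v)) := by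
          have hmc : ∀ i ∈ (List.range s'.length).filter (pickP (some (x, false)) s' u'),
              ((fun i => ((x :: s').getD i 0, remUU (x :: s') ((false :: u').set i true))) ∘ Nat.succ) i
                = ((fun p : Int × List Int => (p.1, x :: p.2)) ∘ (fun i => (s'.getD i 0, remUU s' (u'.set i true)))) i := by
            intro i _
            simp [remUU]
          rw [List.map_congr_left hmc, ← List.map_map, ih u' (some (x, false)) hlen' hsp' hrp2]
          simp only [sk, List.map_map]
          rw [ddp_filter x (remUU s' u')]
          apply List.map_congr_left
          intro v hv
          have hvx : v ≠ x := by
            have := (List.mem_filter.1 ((mem_ddp _ v).1 hv)).2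
            simpa using this
          simp only [Function.comp_apply]
          rw [List.erase_cons_tail (by simpa using fun h => hvx h.symm)]
        have hnoskip : ∀ (hns : (match prev with
                | some (y, c) => decide (x = y) && !c
                | none => false) = false),
            (∀ (y : Int), prev = some (y, false) → y ∉ x :: remUU s' u') →
            List.map (fun i => ((x :: s').getD i 0, remUU (x :: s') ((false :: u').set i true)))
                (if pickP prev (x :: s') (false :: u') 0 = true then
                  0 :: List.map Nat.succ (List.filter (pickP (some (x, false)) s' u') (List.range s'.length))
                 else List.map Nat.succ (List.filter (pickP (some (x, false)) s' u') (List.range s'.length)))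
              = (sk prev (remUU (x :: s') (false :: u'))).map
                  (fun v => (v, (remUU (x :: s') (false :: u')).erase v)) := by
          intro hns hnm
          have hp0 : pickP prev (x :: s') (false :: u') 0 = true := by
            cases prev with
            | none => simp [pickP]
            | some p =>
              rcases p with ⟨y, c⟩
              simp only [pickP, List.getD_cons_zero, Bool.not_false, Bool.true_and]
              simp only [] at hns
              simp at hns ⊢
              all_goals tauto
          rw [hp0]
          simp only [if_true, List.map_cons, List.map_map]
          rw [htl, hrem, sk_eq_ddp prev _ hnm]
          conv_rhs => rw [ddp]
          rw [List.map_cons, List.erase_cons_head]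
          congr 1
        rcases prev with _ | ⟨y, c⟩
        · exact hnoskip rfl (by intro y hy; cases hy)
        · cases c with
          | true =>
            refine hnoskip (by simp) ?_
            intro z hz
            simp at hz
          | false =>
            by_cases hxy : x = y
            · -- skipped: previous equal value is unused
              subst hxy
              have hp0 : pickP (some (x, false)) (x :: s') (false :: u') 0 = false := by
                simp [pickP]
              rw [hp0]
              simp only [Bool.false_eq_true, if_false, List.map_map, htl, hrem]
              have hsk : sk (some (x, false)) (x :: remUU s' u')
                  = ddp ((remUU s' u').filter (fun y => y ≠ x)) := by
                simp only [sk]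
                conv_lhs => rw [ddp]
                rw [List.filter_cons]
                simp only [ne_eq, not_true_eq_false, decide_false, Bool.false_eq_true, if_false]
                exact filter_eq_self_of_ddp x _ (by simp)
              rw [hsk]
            · refine hnoskip (by simp [hxy]) ?_
              intro z hz hmem
              have hzy : y = z := by
                injection hz with h
                exact congrArg Prod.fst h
              subst hzy
              have hsp2 : SP (some y) (x :: s') := hsp
              rcases List.mem_cons.1 hmem with h | h
              · exact hxy h.symm
              · exact hxy (le_antisymm (hxall y h) hsp2.1)

lemma foldl_if_append {α : Type} (p : α → Bool) (g : α → List (List Int)) :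
    ∀ (l : List α) (acc : List (List Int)),
      l.foldl (fun r x => if p x then r ++ g x else r) acc = acc ++ (l.filter p).flatMap g := by
  intro l
  induction l with
  | nil => intro acc; simp
  | cons x t ih =>
    intro acc
    by_cases hx : p x
    · simp [hx, ih]
    · simp [hx, ih]

lemma permsB_spec : ∀ (rem : List Int),
    permsB rem.length rem
      = if rem = [] then [[]]
        else (ddp rem).flatMap (fun x => (permsB (rem.erase x).length (rem.erase x)).map (fun w => x :: w)) := by
  intro rem
  cases rem with
  | nil => simp [permsB]
  | cons x t =>
    have hcg : ∀ (out : List (List Int)) (v : Int), v ∈ PySem.List.dedup (x :: t) →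
        (out ++ (permsB t.length ((PySem.List.remove? (x :: t) v).getD (x :: t))).map (fun w => v :: w))
          = (out ++ (permsB ((x :: t).erase v).length ((x :: t).erase v)).map (fun w => v :: w)) := by
      intro out v hv
      have hvm : v ∈ x :: t := (PySem.List.mem_dedup _ _).1 hv
      rw [PySem.List.remove?_eq_some_erase _ v hvm]
      simp only [Option.getD_some]
      have hlen : ((x :: t).erase v).length = t.length := by
        rw [List.length_erase_of_mem hvm]; simp
      rw [hlen]
    simp only [List.length_cons, permsB]
    rw [PySem.List.foldl_congr_mem _ _
      (fun out v => out ++ (permsB ((x :: t).erase v).length ((x :: t).erase v)).map (fun w => v :: w)) _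
      (fun acc v h => hcg acc v h)]
    rw [PySem.List.foldl_append_eq_flatMap]
    have hdd := dedup_eq_ddp (x :: t)
    rw [PySem.List.dedup_eq_ofList] at hdd
    simp [hdd]

lemma pickP_none_zero_iff (s : List Int) (u : List Bool) :
    pickP none s u 0 = true ↔ u.getD 0 false = false := by
  cases h : u[0]?.getD false <;> simp [pickP, h]

lemma pickP_none_succ_iff (s : List Int) (u : List Bool) (j : Nat) :
    pickP none s u (j + 1) = true
      ↔ (u.getD (j + 1) false = false ∧ ¬(s.getD (j + 1) 0 = s.getD j 0 ∧ u.getD j false = false)) := by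
  cases hA : u[j + 1]?.getD false <;> cases hB : u[j]?.getD false <;>
    by_cases hC : s[j + 1]?.getD 0 = s[j]?.getD 0 <;> simp [pickP, hA, hB, hC]

lemma main : ∀ (f : Nat) (s : List Int) (u : List Bool) (path : List Int) (res : List (List Int)),
    SP none s → u.length = s.length → RP none s u →
    path.length + (remUU s u).length = s.length →
    (remUU s u).length < f →
    helperA s f u path res
      = res ++ (permsB (remUU s u).length (remUU s u)).map (fun t => path ++ t) := by
  intro f
  induction f with
  | zero => intro s u path res _ _ _ _ hf; omega
  | succ f ihf =>
    intro s u path res hsp hlen hrp hcnt hf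
    by_cases hre : remUU s u = []
    · have hpl : path.length = s.length := by rw [hre] at hcnt; simpa using hcnt
      simp only [helperA, if_pos hpl, hre]
      simp [permsB]
    · have hk1 : 0 < (remUU s u).length := List.length_pos_of_ne_nil hre
      have hpl : ¬ path.length = s.length := by omega
      simp only [helperA, if_neg hpl]
      rw [PySem.List.pyRange_one, show (((s.length : Int)) - 0).toNat = s.length by simp,
          List.foldl_map]
      have hcong : ∀ (r : List (List Int)), ∀ i ∈ List.range s.length,
          (if PySem.List.pyGetD u ((0 : Int) + i) false = false then
            if (0 : Int) + i > 0 ∧ PySem.List.pyGetD s ((0 : Int) + i) 0 = PySem.List.pyGetD s ((0 : Int) + i - 1) 0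
                ∧ PySem.List.pyGetD u ((0 : Int) + i - 1) false = false then r
            else helperA s f (u.set ((0 : Int) + i).toNat true) (path ++ [PySem.List.pyGetD s ((0 : Int) + i) 0]) r
           else r)
          = if pickP none s u i then
              r ++ (permsB (remUU s (u.set i true)).length (remUU s (u.set i true))).map
                    (fun t => (path ++ [s.getD i 0]) ++ t)
            else r := by
        intro r i hi
        have hi' : i < s.length := List.mem_range.1 hi
        have hih : u.getD i false = false → pickP none s u i = true →
            helperA s f (u.set i true) (path ++ [s.getD i 0]) r
              = r ++ (permsB (remUU s (u.set i true)).length (remUU s (u.set i true))).map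
                    (fun t => (path ++ [s.getD i 0]) ++ t) := by
          intro hg hpk
          have hkl := remUU_set_len s u i hlen (by omega) hg
          exact ihf s (u.set i true) (path ++ [s.getD i 0]) r hsp
            (by simpa using hlen) (RP_set s u none i hrp hpk)
            (by simp only [List.length_append, List.length_singleton]; omega)
            (by omega)
        cases i with
        | zero =>
          simp only [Nat.cast_zero, add_zero]
          rw [if_neg (show ¬((0 : Int) > 0 ∧ PySem.List.pyGetD s 0 0 = PySem.List.pyGetD s ((0 : Int) - 1) 0
              ∧ PySem.List.pyGetD u ((0 : Int) - 1) false = false) from by simp)]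
          simp only [PySem.List.pyGetD_zero, Int.toNat_zero]
          by_cases hg : u.getD 0 false = false
          · rw [if_pos hg]
            have hpk : pickP none s u 0 = true := (pickP_none_zero_iff s u).2 hg
            rw [hih hg hpk, if_pos hpk]
          · rw [if_neg hg]
            have hpk : pickP none s u 0 = false := by
              cases hb : pickP none s u 0 with
              | false => rfl
              | true => exact absurd ((pickP_none_zero_iff s u).1 hb) hg
            rw [hpk]
            simp
        | succ j =>
          have e1 : ((0 : Int) + (j + 1 : Nat)) = ((j + 1 : Nat) : Int) := by push_cast; ring
          have e2 : ((j + 1 : Nat) : Int) - 1 = (j : Nat) := by push_cast; ring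
          rw [e1, e2]
          simp only [PySem.List.pyGetD_natCast, Int.toNat_natCast]
          rw [if_congr (show ((((j + 1 : Nat) : Int)) > 0 ∧ s.getD (j + 1) 0 = s.getD j 0 ∧ u.getD j false = false)
              ↔ (s.getD (j + 1) 0 = s.getD j 0 ∧ u.getD j false = false) from
              ⟨fun h => h.2, fun h => ⟨by omega, h⟩⟩) rfl rfl]
          by_cases hg : u.getD (j + 1) false = false
          · rw [if_pos hg]
            by_cases hsk : s.getD (j + 1) 0 = s.getD j 0 ∧ u.getD j false = false
            · rw [if_pos hsk]
              have hpk : pickP none s u (j + 1) = false := by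
                cases hb : pickP none s u (j + 1) with
                | false => rfl
                | true => exact absurd hsk ((pickP_none_succ_iff s u j).1 hb).2
              rw [hpk]
              simp
            · rw [if_neg hsk]
              have hpk : pickP none s u (j + 1) = true := (pickP_none_succ_iff s u j).2 ⟨hg, hsk⟩
              rw [hih hg hpk, if_pos hpk]
          · rw [if_neg hg]
            have hpk : pickP none s u (j + 1) = false := by
              cases hb : pickP none s u (j + 1) with
              | false => rfl
              | true => exact absurd ((pickP_none_succ_iff s u j).1 hb).1 hg
            rw [hpk]
            simp
      rw [PySem.List.foldl_congr_mem _ _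
          (fun r i => if pickP none s u i then
              r ++ (permsB (remUU s (u.set i true)).length (remUU s (u.set i true))).map
                    (fun t => (path ++ [s.getD i 0]) ++ t)
            else r) _ (fun r i hi => hcong r i hi)]
      rw [foldl_if_append (pickP none s u)
          (fun i => (permsB (remUU s (u.set i true)).length (remUU s (u.set i true))).map
            (fun t => (path ++ [s.getD i 0]) ++ t))]
      have hflat : ((List.range s.length).filter (pickP none s u)).flatMap
            (fun i => (permsB (remUU s (u.set i true)).length (remUU s (u.set i true))).map
              (fun t => (path ++ [s.getD i 0]) ++ t))
          = (((List.range s.length).filter (pickP none s u)).map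
              (fun i => (s.getD i 0, remUU s (u.set i true)))).flatMap
            (fun p => (permsB p.2.length p.2).map (fun t => (path ++ [p.1]) ++ t)) := by
        rw [List.flatMap_map]
      rw [hflat, core s u none hlen hsp hrp]
      simp only [sk]
      rw [List.flatMap_map]
      rw [permsB_spec (remUU s u), if_neg hre, List.map_flatMap]
      congr 1
      refine congrArg (fun g => List.flatMap g (ddp (remUU s u))) ?_
      funext a
      simp [List.map_map, Function.comp_def]

-- ===== VERDICT (by name: the statement is the Claim_ definition above) =====
theorem permuteUniqueStandard_spec : Claim_equal_permuteUniqueStandard := by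
  unfold Claim_equal_permuteUniqueStandard
  intro nums _
  unfold Spec_permuteUniqueStandard permuteUniqueStandard permuteUniqueStandard_alt
  by_cases h : nums = []
  · simp [h]
  · simp only [if_neg h]
    have hused : (PySem.List.pyRange 0 ((PySem.List.sorted nums (fun x => x) false).length : Int) 1).map (fun _ => false)
        = List.replicate (PySem.List.sorted nums (fun x => x) false).length false := by
      rw [List.map_const']
      congr 1
      simp [PySem.List.length_pyRange_one]
    rw [hused]
    have hsp : SP none (PySem.List.sorted nums (fun x => x) false) :=
      SP_of_pairwise _ (PySem.List.sorted_pairwise nums (fun x => x))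
    have hm := main ((PySem.List.sorted nums (fun x => x) false).length + 1)
      (PySem.List.sorted nums (fun x => x) false)
      (List.replicate (PySem.List.sorted nums (fun x => x) false).length false) [] []
      hsp (by simp) (RP_of_all_false _ _ none (by simp))
      (by rw [remUU_all_false]; simp) (by rw [remUU_all_false]; omega)
    rw [remUU_all_false] at hm
    simpa using hm
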